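-- pv_equiv track=rewrite | github.com/YoojiYang/shift_assign_system | services/for_single_day/get_best_employee/assign_logic/select_employees.py | assign_sub_positions
-- ===== SOURCE A (Python) =====
-- def assign_sub_positions(available_employees, assigned_employees, total_work_time):
--     suitable_employees = [
--         employee_id for employee_id in available_employees
--         if employee_id not in assigned_employees
--     ]
--
--     # total_work_timeの値が低い順にソート
--     suitable_employees.sort(key=lambda employee_id: total_work_time[employee_id])
--
--     if suitable_employees:
--         best_employee = suitable_employees[0] # 最初の適切な従業員を選ぶ
--         assigned_employees.add(best_employee)
--         return best_employee
-- ===== SOURCE B (Python) =====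
-- def assign_sub_positions(available_employees, assigned_employees, total_work_time):
--     best_employee = None
--     best_time = None
--     for employee_id in available_employees:
--         if employee_id not in assigned_employees:
--             t = total_work_time[employee_id]
--             if best_employee is None or t < best_time:
--                 best_employee, best_time = employee_id, t
--     if best_employee is not None:
--         assigned_employees.add(best_employee)
--         return best_employee
-- ===== Notes on version B (the rewrite author's own statement) =====
-- stated objective: alternative
-- what changed: Replaces the filtered-list-then-stable-sort selection with a single pass over available_employees maintaining the current best candidate (strict '<' so the first minimal candidate wins, matching the stable sort's head); it trades the O(n log n) sort for an O(n) scan, though CPython's C sort makes the wall-clock times comparable.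
import Mathlib
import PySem

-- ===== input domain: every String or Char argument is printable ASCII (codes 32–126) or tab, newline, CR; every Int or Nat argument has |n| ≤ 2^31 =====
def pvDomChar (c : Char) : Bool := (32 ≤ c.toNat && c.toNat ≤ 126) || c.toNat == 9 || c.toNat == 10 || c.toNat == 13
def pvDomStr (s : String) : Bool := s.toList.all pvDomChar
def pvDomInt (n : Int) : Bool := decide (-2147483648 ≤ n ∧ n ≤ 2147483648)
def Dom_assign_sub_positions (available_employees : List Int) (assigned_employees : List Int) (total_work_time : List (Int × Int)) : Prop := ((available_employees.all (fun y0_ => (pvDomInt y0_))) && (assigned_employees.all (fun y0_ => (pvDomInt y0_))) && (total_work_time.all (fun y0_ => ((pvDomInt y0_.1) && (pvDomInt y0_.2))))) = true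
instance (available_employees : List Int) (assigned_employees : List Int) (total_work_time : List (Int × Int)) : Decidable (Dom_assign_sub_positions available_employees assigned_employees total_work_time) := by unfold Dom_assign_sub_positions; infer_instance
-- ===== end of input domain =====

-- B replaces filter + stable sort by a single min-scan with strict '<' (first minimal candidate wins,
-- like the stable sort's head). Both Pythons also add the chosen employee to the assigned_employees set
-- in place; the equivalence proved here is about the RETURN value only (B performs the same mutation).

-- ===== PORT A =====
def assign_sub_positions (available_employees : List Int) (assigned_employees : List Int) (total_work_time : List (Int × Int)) : Option Int :=
  let d := PySem.Dict.mk total_work_time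
  let suitable := available_employees.filter (fun e => !(assigned_employees.contains e))
  -- totality guard: where a suitable employee's key is missing Python's sort key raises KeyError; excluded by Pre_
  if suitable.all (fun e => (d.get? e).isSome) then
    match PySem.List.sorted suitable (fun e => d.getD e 0) false with
    | [] => none
    | b :: _ => some b
  else none

-- ===== PORT B =====
-- the for-loop of Source B: state = Option (best_employee, best_time); outer 'none' = KeyError (excluded by Pre_)
def pvBestScan (assigned : List Int) (d : PySem.Dict Int Int) : List Int → Option (Int × Int) → Option (Option (Int × Int))
  | [], best => some best
  | e :: rest, best =>
    if assigned.contains e then pvBestScan assigned d rest best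
    else
      match d.get? e with
      | none => none
      | some t =>
        match best with
        | none => pvBestScan assigned d rest (some (e, t))
        | some (be, bt) =>
          if t < bt then pvBestScan assigned d rest (some (e, t))
          else pvBestScan assigned d rest (some (be, bt))

def assign_sub_positions_alt (available_employees : List Int) (assigned_employees : List Int) (total_work_time : List (Int × Int)) : Option Int :=
  match pvBestScan assigned_employees (PySem.Dict.mk total_work_time) available_employees none with
  | some (some (e, _)) => some e
  | _ => none

-- ===== PRECONDITION & SPEC =====
-- Pre_ excludes exactly the inputs on which both Pythons raise KeyError: some available, not-yet-assigned
-- employee id is missing from the total_work_time dict.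
def Pre_assign_sub_positions (available_employees : List Int) (assigned_employees : List Int) (total_work_time : List (Int × Int)) : Prop :=
  ∀ e ∈ available_employees, assigned_employees.contains e = false →
    ((PySem.Dict.mk total_work_time).get? e).isSome = true
instance (available_employees : List Int) (assigned_employees : List Int) (total_work_time : List (Int × Int)) : Decidable (Pre_assign_sub_positions available_employees assigned_employees total_work_time) := by unfold Pre_assign_sub_positions; infer_instance

def pvWitness_assign_sub_positions : List Int × List Int × (List (Int × Int)) := ([1, 2, 3], [2], [(1, 5), (2, 0), (3, 5)])

def Spec_assign_sub_positions (available_employees : List Int) (assigned_employees : List Int) (total_work_time : List (Int × Int)) (out : Option Int) : Prop := out = assign_sub_positions_alt available_employees assigned_employees total_work_time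
instance (available_employees : List Int) (assigned_employees : List Int) (total_work_time : List (Int × Int)) (out : Option Int) : Decidable (Spec_assign_sub_positions available_employees assigned_employees total_work_time out) := by unfold Spec_assign_sub_positions; infer_instance

-- ===== CLAIM (what is proved, stated in full; the proofs are below) =====
def Claim_equal_assign_sub_positions : Prop := ∀ (available_employees : List Int) (assigned_employees : List Int) (total_work_time : List (Int × Int)), Dom_assign_sub_positions available_employees assigned_employees total_work_time → Pre_assign_sub_positions available_employees assigned_employees total_work_time → Spec_assign_sub_positions available_employees assigned_employees total_work_time (assign_sub_positions available_employees assigned_employees total_work_time)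

-- ===== LEMMAS AND PROOFS =====

-- the fold step of the strict-'<' min-scan, on employee ids (proof-only helper)
def pvMinStep (k : Int → Int) (o : Option Int) (x : Int) : Option Int :=
  match o with
  | none => some x
  | some m => if k x < k m then some x else some m

theorem pvHead?_insertBy (before : Int → Int → Bool) (x : Int) (acc : List Int) :
    (PySem.List.insertBy before x acc).head? =
      match acc.head? with
      | none => some x
      | some h => if before x h then some x else some h := by
  cases acc with
  | nil => simp [PySem.List.insertBy]
  | cons h t => by_cases hb : before x h <;> simp [PySem.List.insertBy, hb]

theorem pvFoldlInsert_head (k : Int → Int) (l acc : List Int) :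
    (l.foldl (fun a x => PySem.List.insertBy (fun p q => decide (k p < k q)) x a) acc).head? =
      l.foldl (pvMinStep k) acc.head? := by
  induction l generalizing acc with
  | nil => rfl
  | cons e rest ih =>
      simp only [List.foldl]
      rw [ih, pvHead?_insertBy]
      cases acc with
      | nil => rfl
      | cons h t =>
          simp only [List.head?_cons, pvMinStep]
          by_cases hb : k e < k h <;> simp [hb]

theorem pvSorted_head? (k : Int → Int) (l : List Int) :
    (PySem.List.sorted l k false).head? = l.foldl (pvMinStep k) none := by
  have : PySem.List.sorted l k false =
      l.foldl (fun a x => PySem.List.insertBy (fun p q => decide (k p < k q)) x a) [] := by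
    simp [PySem.List.sorted]
  rw [this, pvFoldlInsert_head]
  rfl

theorem pvBestScan_eq (asg : List Int) (d : PySem.Dict Int Int) (l : List Int) (o : Option Int)
    (h : ∀ e ∈ l, asg.contains e = false → (d.get? e).isSome = true) :
    pvBestScan asg d l (o.map (fun e => (e, d.getD e 0))) =
      some (((l.filter (fun e => !(asg.contains e))).foldl (pvMinStep (fun e => d.getD e 0)) o).map
        (fun e => (e, d.getD e 0))) := by
  induction l generalizing o with
  | nil => rfl
  | cons e rest ih =>
      by_cases hc : asg.contains e = true
      · have hf : List.filter (fun x => !(asg.contains x)) (e :: rest) =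
            List.filter (fun x => !(asg.contains x)) rest := by
          simp only [List.filter_cons]
          simp [show e ∈ asg by simpa using hc]
        simp only [pvBestScan, hc, if_pos]
        rw [ih _ (fun x hx => h x (List.mem_cons_of_mem _ hx)), hf]
      · have hc' : asg.contains e = false := by simpa using hc
        have hk := h e (List.mem_cons_self) hc'
        obtain ⟨t, ht⟩ := Option.isSome_iff_exists.mp hk
        have hgd : d.getD e 0 = t := by simp [PySem.Dict.getD, ht]
        have hrest : ∀ x ∈ rest, asg.contains x = false → (d.get? x).isSome = true :=
          fun x hx => h x (List.mem_cons_of_mem _ hx)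
        have hf : List.filter (fun x => !(asg.contains x)) (e :: rest) =
            e :: List.filter (fun x => !(asg.contains x)) rest := by
          simp only [List.filter_cons]
          simp [show e ∉ asg by simpa using hc']
        rw [hf]
        cases o with
        | none =>
            simp only [pvBestScan, hc', Option.map_none, Bool.false_eq_true, if_neg, ht]
            rw [show (some (e, t)) = (some e).map (fun x => (x, d.getD x 0)) by simp [hgd]]
            rw [ih _ hrest]
            simp only [List.foldl_cons, pvMinStep]
            simp
        | some m =>
            simp only [pvBestScan, hc', Option.map_some, Bool.false_eq_true, if_neg, ht]
            by_cases hlt : t < d.getD m 0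
            · simp only [hlt, if_pos]
              rw [show (some (e, t)) = (some e).map (fun x => (x, d.getD x 0)) by simp [hgd]]
              rw [ih _ hrest]
              simp [List.foldl_cons, pvMinStep, hgd, hlt]
            · simp only [hlt, if_neg]
              rw [show (some (m, d.getD m 0)) = (some m).map (fun x => (x, d.getD x 0)) by simp]
              rw [ih _ hrest]
              simp [List.foldl_cons, pvMinStep, hgd, hlt]

-- ===== VERDICT (by name: the statement is the Claim_ definition above) =====
theorem assign_sub_positions_spec : Claim_equal_assign_sub_positions := by
  intro av asg twt _ hpre
  unfold Spec_assign_sub_positions assign_sub_positions assign_sub_positions_alt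
  simp only []
  have hall : (av.filter (fun e => !(asg.contains e))).all
      (fun e => ((PySem.Dict.mk twt).get? e).isSome) = true := by
    rw [List.all_eq_true]
    intro e he
    rw [List.mem_filter] at he
    exact hpre e he.1 (by simpa using he.2)
  rw [if_pos hall]
  have hscan := pvBestScan_eq asg (PySem.Dict.mk twt) av none (fun e he hc => hpre e he hc)
  simp only [Option.map_none] at hscan
  rw [hscan]
  have hhead := pvSorted_head? (fun e => (PySem.Dict.mk twt).getD e 0)
    (av.filter (fun e => !(asg.contains e)))
  cases hres : List.foldl (pvMinStep (fun e => (PySem.Dict.mk twt).getD e 0)) none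
      (av.filter (fun e => !(asg.contains e))) with
  | none =>
      rw [hres] at hhead
      cases hs : PySem.List.sorted (av.filter (fun e => !(asg.contains e)))
          (fun e => (PySem.Dict.mk twt).getD e 0) false with
      | nil => simp [hs]
      | cons b t => rw [hs] at hhead; simp at hhead
  | some m =>
      rw [hres] at hhead
      cases hs : PySem.List.sorted (av.filter (fun e => !(asg.contains e)))
          (fun e => (PySem.Dict.mk twt).getD e 0) false with
      | nil => rw [hs] at hhead; simp at hhead
      | cons b t =>
          rw [hs] at hhead
          simp only [List.head?_cons, Option.some.injEq] at hhead
          simp [hs, hhead]
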